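-- pv_equiv track=rewrite | github.com/tngtied/bojHub | 백준/Gold/1976. 여행 가자/여행 가자.py | solution
-- ===== SOURCE A (Python) =====
-- def solution(n, costs, target):
--     # costs.sort(key = lambda x : x[2])
--     parent = [i for i in range(n)]
--     def findRoot(node):
--         if node != parent[node]:
--             parent[node] = findRoot(parent[node])
--         return parent[node]
--     def unionSet(u, v):
--         u_r = findRoot(u)
--         v_r = findRoot(v)
--         parent[u_r] = v_r
--     def sameRoot(u, v):
--         u_r = findRoot(u)
--         v_r = findRoot(v)
--         return u_r == v_r
--     for s, t, w in costs:
--         if not sameRoot(s, t):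
--             unionSet(s, t)
--     answer = set([findRoot(parent[i-1]) for i in target])
--     return len(answer) == 1
-- ===== SOURCE B (Python) =====
-- def solution(n, costs, target):
--     labels = list(range(n))
--     for s, t, w in costs:
--         a, b = labels[s], labels[t]
--         if a != b:
--             labels = [b if x == a else x for x in labels]
--     roots = {labels[i - 1] for i in target}
--     return len(roots) == 1
-- ===== Notes on version B (the rewrite author's own statement) =====
-- stated objective: simpler
-- what changed: Replaces the recursive union-find with path compression by a flat component-label list: each edge that joins two differently-labelled nodes relabels one whole class in a single comprehension pass, and the final set is built from plain label lookups instead of findRoot calls.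
import Mathlib
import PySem

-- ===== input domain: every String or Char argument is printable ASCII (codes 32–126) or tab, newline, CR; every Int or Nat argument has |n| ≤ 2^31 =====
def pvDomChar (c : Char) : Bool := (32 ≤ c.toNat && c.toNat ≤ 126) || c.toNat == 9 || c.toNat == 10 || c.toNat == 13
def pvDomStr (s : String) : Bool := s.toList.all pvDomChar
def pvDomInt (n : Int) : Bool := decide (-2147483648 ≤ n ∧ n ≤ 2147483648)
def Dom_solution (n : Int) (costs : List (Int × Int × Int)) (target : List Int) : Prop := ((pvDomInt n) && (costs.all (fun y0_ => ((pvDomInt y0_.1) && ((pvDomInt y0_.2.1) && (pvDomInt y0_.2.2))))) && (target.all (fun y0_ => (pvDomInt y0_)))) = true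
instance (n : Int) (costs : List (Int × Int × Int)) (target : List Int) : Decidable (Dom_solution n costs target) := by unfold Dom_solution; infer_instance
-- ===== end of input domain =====

-- B replaces A's recursive union-find (path compression) with a flat component-label
-- list relabelled once per merging edge (objective: simpler). Return values only;
-- neither implementation mutates its arguments.

-- ===== PORT A =====
-- findRoot with path compression; 'fuel' only bounds the recursion depth (on admitted
-- inputs the parent list is a forest, so a fuel of len(parent) is never exhausted).
def pvFindRoot (fuel : Nat) (p : List Int) (node : Int) : List Int × Int :=
  match fuel with
  | 0 => (p, PySem.List.pyGetD p node 0)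
  | Nat.succ fuel =>
    let v := PySem.List.pyGetD p node 0
    if node ≠ v then
      let rec1 := pvFindRoot fuel p v
      let p2 := PySem.List.pySetD rec1.1 node rec1.2
      (p2, PySem.List.pyGetD p2 node 0)
    else (p, v)

def pvStep (p : List Int) (e : Int × Int × Int) : List Int :=
  let r1 := pvFindRoot p.length p e.1
  let r2 := pvFindRoot r1.1.length r1.1 e.2.1
  if r1.2 ≠ r2.2 then
    let r3 := pvFindRoot r2.1.length r2.1 e.1
    let r4 := pvFindRoot r3.1.length r3.1 e.2.1
    PySem.List.pySetD r4.1 r3.2 r4.2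
  else r2.1


def solution (n : Int) (costs : List (Int × Int × Int)) (target : List Int) : Bool :=
  let parent0 := PySem.List.pyRange 0 n 1
  let parent := costs.foldl pvStep parent0
  let fin := target.foldl (fun (acc : List Int × List Int) i =>
      let r := pvFindRoot acc.1.length acc.1 (PySem.List.pyGetD acc.1 (i - 1) 0)
      (r.1, acc.2 ++ [r.2])) (parent, [])
  (PySem.Set.ofList fin.2).length == 1

-- ===== PORT B =====
def solution_alt (n : Int) (costs : List (Int × Int × Int)) (target : List Int) : Bool :=
  let labels0 := PySem.List.pyRange 0 n 1
  let labels := costs.foldl (fun L e =>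
      let a := PySem.List.pyGetD L e.1 0
      let b := PySem.List.pyGetD L e.2.1 0
      if a ≠ b then L.map (fun x => if x = a then b else x) else L) labels0
  (PySem.Set.ofList (target.map (fun i => PySem.List.pyGetD labels (i - 1) 0))).length == 1

-- ===== PRECONDITION & SPEC =====
-- Pre_: exactly the inputs on which A raises no IndexError: every cost endpoint and
-- every target index i-1 is a valid (possibly negative) Python index into the
-- n-element parent list.
def Pre_solution (n : Int) (costs : List (Int × Int × Int)) (target : List Int) : Prop :=
  (∀ e ∈ costs, PySem.Raise.InRange n.toNat e.1 ∧ PySem.Raise.InRange n.toNat e.2.1) ∧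
  (∀ i ∈ target, PySem.Raise.InRange n.toNat (i - 1))
instance (n : Int) (costs : List (Int × Int × Int)) (target : List Int) : Decidable (Pre_solution n costs target) := by unfold Pre_solution; infer_instance

def pvWitness_solution : Int × (List (Int × Int × Int)) × List Int := (3, [(0, 1, 5)], [1, 2])

def Spec_solution (n : Int) (costs : List (Int × Int × Int)) (target : List Int) (out : Bool) : Prop := out = solution_alt n costs target
instance (n : Int) (costs : List (Int × Int × Int)) (target : List Int) (out : Bool) : Decidable (Spec_solution n costs target out) := by unfold Spec_solution; infer_instance

-- ===== CLAIM (what is proved, stated in full; the proofs are below) =====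
def Claim_equal_solution : Prop := ∀ (n : Int) (costs : List (Int × Int × Int)) (target : List Int), Dom_solution n costs target → Pre_solution n costs target → Spec_solution n costs target (solution n costs target)

-- ===== LEMMAS AND PROOFS =====

def pvNorm (m : Nat) (i : Int) : Nat := if 0 ≤ i then i.toNat else m - (-i).toNat
def pvPf (p : List Int) (x : Nat) : Nat := (p.getD x 0).toNat
def pvIter (p : List Int) (k : Nat) (x : Nat) : Nat := (pvPf p)^[k] x
def pvRoot (p : List Int) (x : Nat) : Nat := pvIter p (p.length - 1) x
def pvRange (p : List Int) : Prop := ∀ x, x < p.length → 0 ≤ p.getD x 0 ∧ p.getD x 0 < (p.length : Int)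
def pvInv (p : List Int) : Prop := pvRange p ∧ ∀ x, x < p.length → pvPf p (pvIter p (p.length - 1) x) = pvIter p (p.length - 1) x

theorem pvNorm_lt {m : Nat} {i : Int} (h : PySem.Raise.InRange m i) : pvNorm m i < m := by
  obtain ⟨h1, h2⟩ := h; unfold pvNorm; split <;> omega

theorem pvIdx_norm {m : Nat} {i : Int} (h : PySem.Raise.InRange m i) :
    PySem.List.pyIdx? m i = some (pvNorm m i) := by
  obtain ⟨h1, h2⟩ := h
  unfold PySem.List.pyIdx? pvNorm
  split <;> simp <;> try omega

theorem pvGet_norm (p : List Int) (i : Int) (d : Int) (h : PySem.Raise.InRange p.length i) :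
    PySem.List.pyGetD p i d = p.getD (pvNorm p.length i) d := by
  simp [PySem.List.pyGetD, PySem.List.pyGet?, pvIdx_norm h, List.getD_eq_getElem?_getD]

theorem pvSet_norm (p : List Int) (i : Int) (v : Int) (h : PySem.Raise.InRange p.length i) :
    PySem.List.pySetD p i v = p.set (pvNorm p.length i) v := by
  simp [PySem.List.pySetD, PySem.List.pySet?, pvIdx_norm h]

theorem pvPf_lt {p : List Int} (hR : pvRange p) {x : Nat} (hx : x < p.length) :
    pvPf p x < p.length := by
  have := hR x hx; unfold pvPf; omega

theorem pvIter_lt {p : List Int} (hR : pvRange p) {x : Nat} (hx : x < p.length) (k : Nat) :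
    pvIter p k x < p.length := by
  induction k with
  | zero => simpa [pvIter]
  | succ k ih =>
    have : pvIter p (k+1) x = pvPf p (pvIter p k x) := Function.iterate_succ_apply' _ _ _
    rw [this]; exact pvPf_lt hR ih

theorem pvIter_succ' (p : List Int) (k x : Nat) :
    pvIter p (k+1) x = pvPf p (pvIter p k x) := Function.iterate_succ_apply' _ _ _

theorem pvIter_succ (p : List Int) (k x : Nat) :
    pvIter p (k+1) x = pvIter p k (pvPf p x) := Function.iterate_succ_apply _ _ _

theorem pvFixStable {p : List Int} {k x : Nat} (hfix : pvPf p (pvIter p k x) = pvIter p k x)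
    {j : Nat} (hkj : k ≤ j) : pvIter p j x = pvIter p k x := by
  obtain ⟨d, rfl⟩ := Nat.exists_eq_add_of_le hkj
  clear hkj
  induction d with
  | zero => rfl
  | succ d ih =>
    have h : k + (d+1) = (k+d) + 1 := rfl
    rw [h, pvIter_succ', ih, hfix]

theorem pvRoot_fix {p : List Int} (hI : pvInv p) {x : Nat} (hx : x < p.length) :
    pvPf p (pvRoot p x) = pvRoot p x := hI.2 x hx

theorem pvRoot_eq_of_fix {p : List Int} {x : Nat} (hfix : pvPf p x = x) : pvRoot p x = x := by
  have h0 : pvPf p (pvIter p 0 x) = pvIter p 0 x := by simpa [pvIter]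
  have h := pvFixStable (p := p) (k := 0) (x := x) h0 (j := p.length - 1) (Nat.zero_le _)
  simpa [pvIter] using h

theorem pvRoot_pf {p : List Int} (hI : pvInv p) {x : Nat} (hx : x < p.length) :
    pvRoot p (pvPf p x) = pvRoot p x := by
  have hm : p.length - 1 + 1 = p.length := by omega
  have h1 : pvIter p (p.length - 1) (pvPf p x) = pvIter p p.length x := by
    conv_rhs => rw [← hm]
    rw [pvIter_succ]
  have h2 : pvIter p p.length x = pvIter p (p.length - 1) x := by
    have := pvFixStable (pvRoot_fix hI hx) (j := p.length) (by omega)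
    simpa [pvRoot] using this
  unfold pvRoot; rw [h1, h2]

-- pigeonhole stabilization: if some iterate of x is a fixpoint, the (m-1)-th already is
theorem pvShrink {p : List Int} (hR : pvRange p) {x : Nat} (hx : x < p.length)
    {k : Nat} (hfix : pvPf p (pvIter p k x) = pvIter p k x) :
    pvPf p (pvRoot p x) = pvRoot p x := by
  by_contra hnot
  set m := p.length with hm
  have hm1 : 1 ≤ m := by omega
  -- no iterate before index m is a fixpoint
  have hnofix : ∀ i, i ≤ m - 1 → pvPf p (pvIter p i x) ≠ pvIter p i x := by
    intro i hi hfixi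
    apply hnot
    have heq := pvFixStable hfixi (j := m - 1) hi
    unfold pvRoot
    rw [← hm, heq, hfixi]
  -- iterates 0..m-1 are pairwise distinct
  have hinj : ∀ i j, i < j → j ≤ m - 1 → pvIter p i x ≠ pvIter p j x := by
    intro i j hij hj heq
    -- periodicity: iter (i + c*(j-i)) = iter i
    have hper : ∀ c : Nat, pvIter p (i + c * (j - i)) x = pvIter p i x := by
      intro c
      induction c with
      | zero => simp
      | succ c ih =>
        have h1 : i + (c+1) * (j - i) = (j - i) + (i + c * (j - i)) := by
          have : 1 ≤ j - i := by omega
          ring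
        rw [h1]
        have : pvIter p ((j - i) + (i + c * (j - i))) x
            = (pvPf p)^[j - i] (pvIter p (i + c * (j - i)) x) :=
          Function.iterate_add_apply _ _ _ _
        rw [this, ih]
        have h2 : (pvPf p)^[j - i] (pvIter p i x) = pvIter p ((j-i) + i) x :=
          (Function.iterate_add_apply _ _ _ _).symm
        rw [h2]
        have : (j - i) + i = j := by omega
        rw [this, ← heq]
    -- pick c = k: i + k*(j-i) ≥ k, so that iterate equals the stable fix value
    have hbig : k ≤ i + k * (j - i) := by
      have : 1 ≤ j - i := by omega
      calc k ≤ k * (j - i) := Nat.le_mul_of_pos_right _ (by omega)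
        _ ≤ i + k * (j - i) := by omega
    have h3 : pvIter p (i + k * (j - i)) x = pvIter p k x := pvFixStable hfix hbig
    have h4 : pvIter p i x = pvIter p k x := by rw [← hper k, h3]
    exact hnofix i (by omega) (by rw [h4]; exact hfix)
  -- package as injective map Fin (m+1) → Fin m
  have hltm : ∀ i : Nat, pvIter p i x < m := fun i => pvIter_lt hR hx i
  let F : Fin (m + 1) → Fin m := fun i =>
    if h : (i : Nat) < m then ⟨pvIter p i x, hltm i⟩ else ⟨pvIter p k x, hltm k⟩
  have hFinj : Function.Injective F := by
    intro a b hab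
    by_contra hne
    have hne' : (a : Nat) ≠ (b : Nat) := fun h => hne (Fin.ext h)
    -- wlog a < b
    rcases Nat.lt_or_ge (a : Nat) (b : Nat) with hlt | hge
    · by_cases hb : (b : Nat) < m
      · have ha : (a : Nat) < m := by omega
        simp only [F, dif_pos ha, dif_pos hb] at hab
        exact hinj a b hlt (by omega) (by simpa using congrArg Fin.val hab)
      · have hb' : (b : Nat) = m := by omega
        have ha : (a : Nat) < m := by omega
        simp only [F, dif_pos ha, dif_neg (by omega : ¬ (b:Nat) < m)] at hab
        have : pvIter p a x = pvIter p k x := by simpa using congrArg Fin.val hab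
        exact hnofix a (by omega) (by rw [this]; exact hfix)
    · have hlt : (b : Nat) < (a : Nat) := by omega
      by_cases ha : (a : Nat) < m
      · have hb : (b : Nat) < m := by omega
        simp only [F, dif_pos ha, dif_pos hb] at hab
        exact hinj b a hlt (by omega) (by simpa using (congrArg Fin.val hab).symm)
      · have hb : (b : Nat) < m := by omega
        simp only [F, dif_neg ha, dif_pos hb] at hab
        have : pvIter p b x = pvIter p k x := by simpa using (congrArg Fin.val hab).symm
        exact hnofix b (by omega) (by rw [this]; exact hfix)
  have := Fintype.card_le_of_injective F hFinj
  simp at this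

theorem pvPf_set {p : List Int} {x : Nat} (hx : x < p.length) (r : Nat) (y : Nat) :
    pvPf (p.set x (r : Int)) y = if y = x then r else pvPf p y := by
  unfold pvPf
  rw [List.getD_eq_getElem?_getD, List.getD_eq_getElem?_getD, List.getElem?_set]
  by_cases hxy : x = y
  · subst hxy
    simp [hx]
  · simp [hxy, Ne.symm hxy]

theorem pvStayFix {q : List Int} {y : Nat} (h : pvPf q y = y) (j : Nat) : pvIter q j y = y := by
  induction j with
  | zero => rfl
  | succ j ih => rw [pvIter_succ', ih, h]

-- after p[x] := r (r a fixpoint): iterating from x reaches r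
theorem pvSetIterX {p : List Int} {x r : Nat} (hx : x < p.length) (hrfix : pvPf p r = r) :
    ∀ fuel, 1 ≤ fuel → pvIter (p.set x (r : Int)) fuel x = r := by
  intro fuel hfuel
  have hpz : pvPf (p.set x (r : Int)) x = r := by rw [pvPf_set hx]; simp
  have hrfix' : pvPf (p.set x (r : Int)) r = r := by
    rw [pvPf_set hx]
    split
    · simp_all
    · exact hrfix
  obtain ⟨fuel', rfl⟩ := Nat.exists_eq_add_of_le hfuel
  have h1 : pvIter (p.set x (r : Int)) (1 + fuel') x
      = pvIter (p.set x (r : Int)) fuel' (pvPf (p.set x (r : Int)) x) := by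
    rw [Nat.add_comm 1 fuel']
    exact pvIter_succ _ fuel' x
  rw [h1, hpz, pvStayFix hrfix']

-- after p[x] := r: a p-fixpoint z keeps its root (which is r exactly when z is x's class root)
theorem pvSetIterFix {p : List Int} {x r : Nat} (hI : pvInv p) (hx : x < p.length)
    (hrfix : pvPf p r = r) (hcase : r = pvRoot p x ∨ pvPf p x = x)
    {z : Nat} (hfz : pvPf p z = z) :
    ∀ fuel, 1 ≤ fuel →
      pvIter (p.set x (r : Int)) fuel z = (if pvRoot p z = pvRoot p x then r else pvRoot p z) := by
  intro fuel hfuel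
  have hrz : pvRoot p z = z := pvRoot_eq_of_fix hfz
  by_cases hzx : z = x
  · subst hzx
    rw [if_pos (by rw [hrz]), pvSetIterX hx hrfix fuel hfuel]
  · have hpz : pvPf (p.set x (r : Int)) z = z := by rw [pvPf_set hx, if_neg hzx]; exact hfz
    rw [pvStayFix hpz fuel, hrz]
    by_cases hcond : z = pvRoot p x
    · rw [if_pos hcond]
      rcases hcase with hcl | hcr
      · omega
      · have : pvRoot p x = x := pvRoot_eq_of_fix hcr
        omega
    · rw [if_neg hcond]

-- the central lemma: roots after p[x] := r, for any z whose k-th iterate is a fixpoint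
theorem pvSetIter {p : List Int} {x r : Nat} (hI : pvInv p) (hx : x < p.length)
    (hr : r < p.length) (hrfix : pvPf p r = r)
    (hcase : r = pvRoot p x ∨ pvPf p x = x) :
    ∀ k z, z < p.length → pvPf p (pvIter p k z) = pvIter p k z →
      ∀ fuel, k + 1 ≤ fuel →
        pvIter (p.set x (r : Int)) fuel z = (if pvRoot p z = pvRoot p x then r else pvRoot p z) := by
  intro k
  induction k with
  | zero =>
    intro z hz hfixz fuel hfuel
    exact pvSetIterFix hI hx hrfix hcase (by simpa [pvIter] using hfixz) fuel hfuel
  | succ k ih =>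
    intro z hz hfixz fuel hfuel
    by_cases hfz : pvPf p z = z
    · exact pvSetIterFix hI hx hrfix hcase hfz fuel (by omega)
    · by_cases hzx : z = x
      · subst hzx
        rw [if_pos rfl]
        exact pvSetIterX hx hrfix fuel (by omega)
      · have hw : pvPf (p.set x (r : Int)) z = pvPf p z := by rw [pvPf_set hx, if_neg hzx]
        have hwlt : pvPf p z < p.length := pvPf_lt hI.1 hz
        have hwfix : pvPf p (pvIter p k (pvPf p z)) = pvIter p k (pvPf p z) := by
          rw [← pvIter_succ]; exact hfixz
        obtain ⟨fuel', rfl⟩ := Nat.exists_eq_add_of_le hfuel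
        have hstep : k + 1 + 1 + fuel' = (k + 1 + fuel') + 1 := by omega
        rw [hstep, pvIter_succ, hw]
        rw [ih (pvPf p z) hwlt hwfix (k + 1 + fuel') (by omega)]
        rw [pvRoot_pf hI hz]

-- corollary: p[x] := r preserves the invariant and merges/preserves root classes
theorem pvSetInvRoot {p : List Int} {x r : Nat} (hI : pvInv p) (hx : x < p.length)
    (hr : r < p.length) (hrfix : pvPf p r = r)
    (hcase : r = pvRoot p x ∨ pvPf p x = x) :
    pvInv (p.set x (r : Int)) ∧
      ∀ z, z < p.length →
        pvRoot (p.set x (r : Int)) z = (if pvRoot p z = pvRoot p x then r else pvRoot p z) := by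
  set p' := p.set x (r : Int) with hp'
  have hlen : p'.length = p.length := by simp [hp']
  have hR' : pvRange p' := by
    intro y hy
    rw [hlen] at hy
    have hgoal : p'.getD y 0 = if x = y then (r : Int) else p.getD y 0 := by
      rw [hp', List.getD_eq_getElem?_getD, List.getElem?_set]
      by_cases hxy : x = y
      · simp [hxy, hxy ▸ hx]
      · simp [hxy, List.getD_eq_getElem?_getD]
    rw [hlen, hgoal]
    by_cases hxy : x = y
    · rw [if_pos hxy]
      constructor
      · positivity
      · exact_mod_cast hr
    · rw [if_neg hxy]
      exact hI.1 y hy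
  -- for each z: the m-th iterate in p' is the new root value, which is a p'-fixpoint
  have hmain : ∀ z, z < p.length →
      pvIter p' p.length z = (if pvRoot p z = pvRoot p x then r else pvRoot p z) := by
    intro z hz
    exact pvSetIter hI hx hr hrfix hcase (p.length - 1) z hz (pvRoot_fix hI hz) p.length (by omega)
  have hfix' : ∀ z, z < p.length → pvPf p' (pvIter p' p.length z) = pvIter p' p.length z := by
    intro z hz
    rw [hmain z hz]
    split
    · -- value r
      rw [hp', pvPf_set hx]
      split
      · simp_all
      · exact hrfix
    · -- value pvRoot p z, which differs from x unless condition held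
      rename_i hcond
      have hrzfix : pvPf p (pvRoot p z) = pvRoot p z := pvRoot_fix hI hz
      have hne : pvRoot p z ≠ x := by
        intro hex
        apply hcond
        have hxf : pvPf p x = x := by rw [← hex]; exact hrzfix
        rw [pvRoot_eq_of_fix hxf, hex]
      rw [hp', pvPf_set hx, if_neg hne]
      exact hrzfix
  -- pigeonhole: the (m-1)-th iterate is already a fixpoint
  have hreach : ∀ z, z < p'.length → pvPf p' (pvRoot p' z) = pvRoot p' z := by
    intro z hz
    exact pvShrink hR' hz (k := p.length) (hfix' z (by omega))
  constructor
  · exact ⟨hR', fun z hz => hreach z hz⟩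
  · intro z hz
    have hz' : z < p'.length := by omega
    have hfixm1 : pvPf p' (pvIter p' (p'.length - 1) z) = pvIter p' (p'.length - 1) z := hreach z hz'
    have hstab := pvFixStable hfixm1 (j := p.length) (by omega)
    have : pvIter p' p.length z = pvRoot p' z := by rw [hstab]; rfl
    rw [← this, hmain z hz]

theorem pvGetD_cast {p : List Int} (hR : pvRange p) {x : Nat} (hx : x < p.length) :
    p.getD x 0 = ((pvPf p x : Nat) : Int) := by
  have := hR x hx
  unfold pvPf
  omega

-- compressing an already-found root into index x changes nothing about roots
theorem pvSetRootSelf {p1 : List Int} (hI1 : pvInv p1) {x : Nat} (hx : x < p1.length) :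
    pvInv (p1.set x ((pvRoot p1 x : Nat) : Int)) ∧
      ∀ z, z < p1.length → pvRoot (p1.set x ((pvRoot p1 x : Nat) : Int)) z = pvRoot p1 z := by
  have h := pvSetInvRoot (r := pvRoot p1 x) hI1 hx (pvIter_lt hI1.1 hx _) (pvRoot_fix hI1 hx) (Or.inl rfl)
  refine ⟨h.1, fun z hz => ?_⟩
  rw [h.2 z hz]
  split
  · rename_i hc
    rw [← hc]
  · rfl

theorem pvFrFix {p : List Int} (hR : pvRange p) {x : Nat} (hx : x < p.length)
    (hfz : pvPf p x = x) (fuel : Nat) :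
    pvFindRoot fuel p (x : Int) = (p, (x : Int)) := by
  have hv : PySem.List.pyGetD p (x : Int) 0 = (x : Int) := by
    rw [PySem.List.pyGetD_natCast, pvGetD_cast hR hx, hfz]
  cases fuel with
  | zero => simp [pvFindRoot, hv]
  | succ fuel => simp [pvFindRoot, hv]

theorem pvFrNat (k : Nat) : ∀ (p : List Int) (x : Nat) (fuel : Nat), pvInv p → x < p.length →
    pvPf p (pvIter p k x) = pvIter p k x → k ≤ fuel →
    (pvFindRoot fuel p (x : Int)).1.length = p.length ∧
    pvInv (pvFindRoot fuel p (x : Int)).1 ∧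
    (∀ z, z < p.length → pvRoot (pvFindRoot fuel p (x : Int)).1 z = pvRoot p z) ∧
    (pvFindRoot fuel p (x : Int)).2 = ((pvRoot p x : Nat) : Int) := by
  induction k with
  | zero =>
    intro p x fuel hI hx hfix _
    have hfz : pvPf p x = x := by simpa [pvIter] using hfix
    rw [pvFrFix hI.1 hx hfz fuel]
    refine ⟨rfl, hI, fun z _ => rfl, ?_⟩
    rw [pvRoot_eq_of_fix hfz]
  | succ k ih =>
    intro p x fuel hI hx hfix hkf
    by_cases hfz : pvPf p x = x
    · rw [pvFrFix hI.1 hx hfz fuel]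
      refine ⟨rfl, hI, fun z _ => rfl, ?_⟩
      rw [pvRoot_eq_of_fix hfz]
    · obtain ⟨fuel', rfl⟩ := Nat.exists_eq_add_of_le hkf
      have hfuel1 : k + 1 + fuel' = (k + fuel') + 1 := by omega
      rw [hfuel1]
      have hv : PySem.List.pyGetD p (x : Int) 0 = ((pvPf p x : Nat) : Int) := by
        rw [PySem.List.pyGetD_natCast, pvGetD_cast hI.1 hx]
      have hne : (x : Int) ≠ ((pvPf p x : Nat) : Int) := by
        intro h
        exact hfz (by exact_mod_cast h.symm)
      have hwlt : pvPf p x < p.length := pvPf_lt hI.1 hx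
      have hwfix : pvPf p (pvIter p k (pvPf p x)) = pvIter p k (pvPf p x) := by
        rw [← pvIter_succ]; exact hfix
      obtain ⟨hlen1, hI1, hroots1, hval1⟩ :=
        ih p (pvPf p x) (k + fuel') hI hwlt hwfix (by omega)
      set res := pvFindRoot (k + fuel') p ((pvPf p x : Nat) : Int) with hres
      show _ ∧ _ ∧ _ ∧ _
      simp only [pvFindRoot, hv, if_pos hne, ← hres]
      have hrr : pvRoot p (pvPf p x) = pvRoot p x := pvRoot_pf hI hx
      have hval1' : res.2 = ((pvRoot p x : Nat) : Int) := by rw [hval1, hrr]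
      have hxr : x < res.1.length := by omega
      have hset : PySem.List.pySetD res.1 (x : Int) res.2
          = res.1.set x ((pvRoot res.1 x : Nat) : Int) := by
        rw [hval1', PySem.List.pySetD_natCast, hroots1 x (by omega)]
      rw [hset]
      obtain ⟨hI2, hroots2⟩ := pvSetRootSelf hI1 hxr
      have hlen2 : (res.1.set x ((pvRoot res.1 x : Nat) : Int)).length = p.length := by
        simp [hlen1]
      have hget2 : PySem.List.pyGetD (res.1.set x ((pvRoot res.1 x : Nat) : Int)) (x : Int) 0
          = ((pvRoot p x : Nat) : Int) := by
        rw [PySem.List.pyGetD_natCast, List.getD_eq_getElem?_getD, List.getElem?_set_self hxr]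
        simp [hroots1 x (by omega)]
      refine ⟨hlen2, hI2, fun z hz => ?_, hget2⟩
      rw [hroots2 z (by omega), hroots1 z (by omega)]

theorem pvFrInt (p : List Int) (node : Int) (hI : pvInv p)
    (h : PySem.Raise.InRange p.length node) :
    (pvFindRoot p.length p node).1.length = p.length ∧
    pvInv (pvFindRoot p.length p node).1 ∧
    (∀ z, z < p.length → pvRoot (pvFindRoot p.length p node).1 z = pvRoot p z) ∧
    (pvFindRoot p.length p node).2 = ((pvRoot p (pvNorm p.length node) : Nat) : Int) := by
  set x := pvNorm p.length node with hxdef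
  have hx : x < p.length := pvNorm_lt h
  by_cases hpos : 0 ≤ node
  · have hnode : node = (x : Int) := by
      rw [hxdef]; unfold pvNorm; rw [if_pos hpos]; omega
    rw [hnode]
    exact pvFrNat (p.length - 1) p x p.length hI hx (pvRoot_fix hI hx) (by omega)
  · have hneg : node < 0 := by omega
    have hm1 : 1 ≤ p.length := by
      obtain ⟨h1, h2⟩ := h; omega
    obtain ⟨n, hn⟩ : ∃ n, p.length = n + 1 := ⟨p.length - 1, by omega⟩
    have hv : PySem.List.pyGetD p node 0 = ((pvPf p x : Nat) : Int) := by
      rw [pvGet_norm p node 0 h, pvGetD_cast hI.1 hx]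
    have hne : node ≠ ((pvPf p x : Nat) : Int) := by
      intro hcontra; omega
    have hwlt : pvPf p x < p.length := pvPf_lt hI.1 hx
    have hwfix : pvPf p (pvIter p n (pvPf p x)) = pvIter p n (pvPf p x) := by
      have h1 : pvIter p n (pvPf p x) = pvIter p (n + 1) x := (pvIter_succ p n x).symm
      have h2 : pvIter p (n + 1) x = pvIter p (p.length - 1) x := by
        refine pvFixStable (pvRoot_fix hI hx) ?_
        omega
      rw [h1, h2]
      exact pvRoot_fix hI hx
    obtain ⟨hlen1, hI1, hroots1, hval1⟩ :=
      pvFrNat n p (pvPf p x) n hI hwlt hwfix (le_refl n)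
    have hrr : pvRoot p (pvPf p x) = pvRoot p x := pvRoot_pf hI hx
    set res := pvFindRoot n p ((pvPf p x : Nat) : Int) with hres
    have hval1' : res.2 = ((pvRoot p x : Nat) : Int) := by rw [hval1, hrr]
    have hxr : x < res.1.length := by omega
    have hInR1 : PySem.Raise.InRange res.1.length node := by rw [hlen1]; exact h
    have hnorm1 : pvNorm res.1.length node = x := by rw [hlen1]
    have hset : PySem.List.pySetD res.1 node res.2
        = res.1.set x ((pvRoot res.1 x : Nat) : Int) := by
      rw [hval1', pvSet_norm res.1 node _ hInR1, hnorm1, hroots1 x (by omega)]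
    obtain ⟨hI2, hroots2⟩ := pvSetRootSelf hI1 hxr
    have hlen2 : (res.1.set x ((pvRoot res.1 x : Nat) : Int)).length = p.length := by
      simp [hlen1]
    have hInR2 : PySem.Raise.InRange (res.1.set x ((pvRoot res.1 x : Nat) : Int)).length node := by
      rw [hlen2]; exact h
    have hget2 : PySem.List.pyGetD (res.1.set x ((pvRoot res.1 x : Nat) : Int)) node 0
        = ((pvRoot p x : Nat) : Int) := by
      rw [pvGet_norm _ node 0 hInR2]
      have : pvNorm (res.1.set x ((pvRoot res.1 x : Nat) : Int)).length node = x := by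
        rw [hlen2]
      rw [this, List.getD_eq_getElem?_getD, List.getElem?_set_self hxr]
      simp [hroots1 x (by omega)]
    have key : pvFindRoot p.length p node
        = (res.1.set x ((pvRoot res.1 x : Nat) : Int), ((pvRoot p x : Nat) : Int)) := by
      conv_lhs => rw [hn]
      simp only [pvFindRoot, hv, if_pos hne, ← hres]
      rw [hset, hget2]
    rw [key]
    exact ⟨hlen2, hI2, fun z hz => by rw [hroots2 z (by omega), hroots1 z (by omega)], rfl⟩

inductive pvConn (m : Nat) (E : List (Int × Int × Int)) : Nat → Nat → Prop
  | base (e : Int × Int × Int) (he : e ∈ E) : pvConn m E (pvNorm m e.1) (pvNorm m e.2.1)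
  | refl (x : Nat) : pvConn m E x x
  | symm {x y : Nat} : pvConn m E x y → pvConn m E y x
  | trans {x y z : Nat} : pvConn m E x y → pvConn m E y z → pvConn m E x z

theorem pvConn_nil {m : Nat} {x y : Nat} (h : pvConn m [] x y) : x = y := by
  induction h with
  | base e he => cases he
  | refl x => rfl
  | symm _ ih => omega
  | trans _ _ ih1 ih2 => omega

theorem pvConn_mono {m : Nat} {E : List (Int × Int × Int)} (e : Int × Int × Int) {x y : Nat}
    (h : pvConn m E x y) : pvConn m (E ++ [e]) x y := by
  induction h with
  | base e' he' => exact pvConn.base e' (List.mem_append_left _ he')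
  | refl x => exact pvConn.refl x
  | symm _ ih => exact ih.symm
  | trans _ _ ih1 ih2 => exact ih1.trans ih2

theorem pvConn_snoc {m : Nat} {E : List (Int × Int × Int)} {e : Int × Int × Int} {x y : Nat} :
    pvConn m (E ++ [e]) x y ↔
      pvConn m E x y ∨
      (pvConn m E x (pvNorm m e.1) ∧ pvConn m E (pvNorm m e.2.1) y) ∨
      (pvConn m E x (pvNorm m e.2.1) ∧ pvConn m E (pvNorm m e.1) y) := by
  constructor
  · intro h
    induction h with
    | base e' he' =>
      rcases List.mem_append.mp he' with h1 | h2
      · exact Or.inl (pvConn.base e' h1)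
      · have he : e' = e := by simpa using h2
        subst he
        exact Or.inr (Or.inl ⟨pvConn.refl _, pvConn.refl _⟩)
    | refl x => exact Or.inl (pvConn.refl x)
    | symm _ ih =>
      rcases ih with h1 | h2 | h3
      · exact Or.inl h1.symm
      · exact Or.inr (Or.inr ⟨h2.2.symm, h2.1.symm⟩)
      · exact Or.inr (Or.inl ⟨h3.2.symm, h3.1.symm⟩)
    | trans _ _ ih1 ih2 =>
      rcases ih1 with a1 | a2 | a3 <;> rcases ih2 with b1 | b2 | b3
      · exact Or.inl (a1.trans b1)
      · exact Or.inr (Or.inl ⟨a1.trans b2.1, b2.2⟩)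
      · exact Or.inr (Or.inr ⟨a1.trans b3.1, b3.2⟩)
      · exact Or.inr (Or.inl ⟨a2.1, a2.2.trans b1⟩)
      · exact Or.inr (Or.inl ⟨a2.1, b2.2⟩)
      · exact Or.inl (a2.1.trans b3.2)
      · exact Or.inr (Or.inr ⟨a3.1, a3.2.trans b1⟩)
      · exact Or.inl (a3.1.trans b2.2)
      · exact Or.inr (Or.inr ⟨a3.1, b3.2⟩)
  · intro h
    have he : pvConn m (E ++ [e]) (pvNorm m e.1) (pvNorm m e.2.1) :=
      pvConn.base e (List.mem_append_right _ (List.mem_singleton_self e))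
    rcases h with h1 | h2 | h3
    · exact pvConn_mono e h1
    · exact ((pvConn_mono e h2.1).trans he).trans (pvConn_mono e h2.2)
    · exact ((pvConn_mono e h3.1).trans he.symm).trans (pvConn_mono e h3.2)

-- A-side state description
def pvAOK (m : Nat) (E : List (Int × Int × Int)) (p : List Int) : Prop :=
  pvInv p ∧ p.length = m ∧
    ∀ x y, x < m → y < m → (pvRoot p x = pvRoot p y ↔ pvConn m E x y)

theorem pvStepOK {m : Nat} {E : List (Int × Int × Int)} {p : List Int}
    (hA : pvAOK m E p) {e : Int × Int × Int}
    (hs : PySem.Raise.InRange m e.1) (ht : PySem.Raise.InRange m e.2.1) :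
    pvAOK m (E ++ [e]) (pvStep p e) := by
  obtain ⟨hI, hlen, hrel⟩ := hA
  subst hlen
  set s' := pvNorm p.length e.1 with hs'
  set t' := pvNorm p.length e.2.1 with ht'
  have hsl : s' < p.length := pvNorm_lt hs
  have htl : t' < p.length := pvNorm_lt ht
  obtain ⟨hl1, hI1, hrt1, hv1⟩ := pvFrInt p e.1 hI hs
  rw [← hs'] at hv1
  set p1 := (pvFindRoot p.length p e.1).1 with hp1
  have hInR1 : PySem.Raise.InRange p1.length e.2.1 := by rw [hl1]; exact ht
  obtain ⟨hl2, hI2, hrt2, hv2⟩ := pvFrInt p1 e.2.1 hI1 hInR1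
  set p2 := (pvFindRoot p1.length p1 e.2.1).1 with hp2
  have hl2' : p2.length = p.length := by rw [hl2, hl1]
  have hnorm2 : pvNorm p1.length e.2.1 = t' := by rw [hl1]
  have hv2' : (pvFindRoot p1.length p1 e.2.1).2 = ((pvRoot p t' : Nat) : Int) := by
    rw [hv2, hnorm2, hrt1 t' htl]
  by_cases hroots : pvRoot p s' = pvRoot p t'
  · -- sameRoot: no union, edge joins an existing class
    have hveq : (pvFindRoot p.length p e.1).2 = (pvFindRoot p1.length p1 e.2.1).2 := by
      rw [hv1, hv2']
      exact_mod_cast hroots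
    have hstep : pvStep p e = p2 := by
      simp only [pvStep]
      rw [← hp1, ← hp2, if_neg (not_not_intro hveq)]
    rw [hstep]
    refine ⟨hI2, hl2', fun x y hx hy => ?_⟩
    rw [hrt2 x (by omega), hrt2 y (by omega), hrt1 x hx, hrt1 y hy]
    rw [hrel x y hx hy, pvConn_snoc]
    constructor
    · exact fun h => Or.inl h
    · intro h
      have hst : pvConn p.length E s' t' := (hrel s' t' hsl htl).mp hroots
      rcases h with h1 | h2 | h3
      · exact h1
      · exact (h2.1.trans hst).trans h2.2
      · exact (h3.1.trans hst.symm).trans h3.2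
  · -- union branch
    have hvne : (pvFindRoot p.length p e.1).2 ≠ (pvFindRoot p1.length p1 e.2.1).2 := by
      rw [hv1, hv2']
      intro hcontra
      exact hroots (by exact_mod_cast hcontra)
    have hInR3 : PySem.Raise.InRange p2.length e.1 := by rw [hl2']; exact hs
    obtain ⟨hl3, hI3, hrt3, hv3⟩ := pvFrInt p2 e.1 hI2 hInR3
    set p3 := (pvFindRoot p2.length p2 e.1).1 with hp3
    have hl3' : p3.length = p.length := by rw [hl3, hl2']
    have hnorm3 : pvNorm p2.length e.1 = s' := by rw [hl2']
    have hv3' : (pvFindRoot p2.length p2 e.1).2 = ((pvRoot p s' : Nat) : Int) := by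
      rw [hv3, hnorm3, hrt2 s' (by omega), hrt1 s' hsl]
    have hInR4 : PySem.Raise.InRange p3.length e.2.1 := by rw [hl3']; exact ht
    obtain ⟨hl4, hI4, hrt4, hv4⟩ := pvFrInt p3 e.2.1 hI3 hInR4
    set p4 := (pvFindRoot p3.length p3 e.2.1).1 with hp4
    have hl4' : p4.length = p.length := by rw [hl4, hl3']
    have hnorm4 : pvNorm p3.length e.2.1 = t' := by rw [hl3']
    have hv4' : (pvFindRoot p3.length p3 e.2.1).2 = ((pvRoot p t' : Nat) : Int) := by
      rw [hv4, hnorm4, hrt3 t' (by omega), hrt2 t' (by omega), hrt1 t' htl]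
    -- roots in p4 agree with roots in p
    have hrt4' : ∀ z, z < p.length → pvRoot p4 z = pvRoot p z := by
      intro z hz
      rw [hrt4 z (by omega), hrt3 z (by omega), hrt2 z (by omega), hrt1 z hz]
    set ur := pvRoot p s' with hur
    set vr := pvRoot p t' with hvr
    have hurl : ur < p.length := pvIter_lt hI.1 hsl _
    have hvrl : vr < p.length := pvIter_lt hI.1 htl _
    have hstep : pvStep p e = p4.set ur ((vr : Nat) : Int) := by
      simp only [pvStep]
      rw [← hp1, ← hp2, if_pos hvne, ← hp3, ← hp4, hv3', hv4', PySem.List.pySetD_natCast]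
    rw [hstep]
    -- apply the union case of pvSetInvRoot on p4
    have hurfix4 : pvPf p4 ur = ur := by
      have : ur = pvRoot p4 s' := by rw [hrt4' s' hsl]
      rw [this]
      exact pvRoot_fix hI4 (by omega)
    have hvrfix4 : pvPf p4 vr = vr := by
      have : vr = pvRoot p4 t' := by rw [hrt4' t' htl]
      rw [this]
      exact pvRoot_fix hI4 (by omega)
    obtain ⟨hI5, hrt5⟩ := pvSetInvRoot (r := vr) hI4 (by omega) (by omega) hvrfix4 (Or.inr hurfix4)
    obtain ⟨hI5, hrt5⟩ := pvSetInvRoot (r := vr) hI4 (by omega) (by omega) hvrfix4 (Or.inr hurfix4)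
    have hrur4 : pvRoot p4 ur = ur := pvRoot_eq_of_fix hurfix4
    refine ⟨hI5, by simp [hl4'], fun x y hx hy => ?_⟩
    rw [hrt5 x (by omega), hrt5 y (by omega), hrur4, hrt4' x hx, hrt4' y hy]
    have hxs : pvRoot p x = ur ↔ pvConn p.length E x s' := hrel x s' hx hsl
    have hys : pvRoot p y = ur ↔ pvConn p.length E y s' := hrel y s' hy hsl
    have hxt : pvRoot p x = vr ↔ pvConn p.length E x t' := hrel x t' hx htl
    have hyt : pvRoot p y = vr ↔ pvConn p.length E y t' := hrel y t' hy htl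
    have hxy : pvRoot p x = pvRoot p y ↔ pvConn p.length E x y := hrel x y hx hy
    rw [pvConn_snoc]
    by_cases hx1 : pvRoot p x = ur <;> by_cases hy1 : pvRoot p y = ur
    · rw [if_pos hx1, if_pos hy1]
      simp only [true_iff]
      exact Or.inl ((hxs.mp hx1).trans (hys.mp hy1).symm)
    · rw [if_pos hx1, if_neg hy1]
      constructor
      · intro hveq
        exact Or.inr (Or.inl ⟨hxs.mp hx1, (hyt.mp hveq.symm).symm⟩)
      · intro h
        rcases h with h1 | h2 | h3
        · exact absurd ((hxy.mpr h1).symm.trans hx1) hy1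
        · exact (hyt.mpr h2.2.symm).symm
        · exact absurd (hx1.symm.trans (hxt.mpr h3.1)) hroots
    · rw [if_neg hx1, if_pos hy1]
      constructor
      · intro hveq
        exact Or.inr (Or.inr ⟨hxt.mp hveq, (hys.mp hy1).symm⟩)
      · intro h
        rcases h with h1 | h2 | h3
        · exact absurd ((hxy.mpr h1).trans hy1) hx1
        · exact absurd (hxs.mpr h2.1) hx1
        · exact hxt.mpr h3.1
    · rw [if_neg hx1, if_neg hy1]
      rw [hxy]
      constructor
      · exact fun h => Or.inl h
      · intro h
        rcases h with h1 | h2 | h3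
        · exact h1
        · exact absurd (hxs.mpr h2.1) hx1
        · exact absurd (hys.mpr h3.2.symm) hy1

theorem pvInitOK (n : Int) : pvAOK n.toNat [] (PySem.List.pyRange 0 n 1) := by
  have hlen : (PySem.List.pyRange 0 n 1).length = n.toNat := by
    rw [PySem.List.length_pyRange_one]
    simp
  have hval : ∀ x : Nat, x < (PySem.List.pyRange 0 n 1).length →
      (PySem.List.pyRange 0 n 1).getD x 0 = (x : Int) := by
    intro x hx
    rw [List.getD_eq_getElem?_getD, List.getElem?_eq_getElem hx, Option.getD_some,
      PySem.List.getElem_pyRange_one]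
    simp
  have hpf : ∀ x : Nat, x < (PySem.List.pyRange 0 n 1).length →
      pvPf (PySem.List.pyRange 0 n 1) x = x := by
    intro x hx
    unfold pvPf
    rw [hval x hx]
    simp
  have hR : pvRange (PySem.List.pyRange 0 n 1) := by
    intro x hx
    rw [hval x hx]
    constructor <;> omega
  have hI : pvInv (PySem.List.pyRange 0 n 1) := ⟨hR, fun x hx => by
    rw [pvStayFix (hpf x hx) _]
    exact hpf x hx⟩
  have hroot : ∀ x : Nat, x < (PySem.List.pyRange 0 n 1).length →
      pvRoot (PySem.List.pyRange 0 n 1) x = x :=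
    fun x hx => pvRoot_eq_of_fix (hpf x hx)
  refine ⟨hI, hlen, fun x y hx hy => ?_⟩
  rw [hroot x (by omega), hroot y (by omega)]
  constructor
  · intro h; rw [h]; exact pvConn.refl y
  · exact pvConn_nil

theorem pvFoldA (m : Nat) : ∀ (costs E0 : List (Int × Int × Int)) (p : List Int),
    pvAOK m E0 p →
    (∀ e ∈ costs, PySem.Raise.InRange m e.1 ∧ PySem.Raise.InRange m e.2.1) →
    pvAOK m (E0 ++ costs) (costs.foldl pvStep p) := by
  intro costs
  induction costs with
  | nil => intro E0 p hA _; simpa using hA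
  | cons e cs ih =>
    intro E0 p hA hPre
    have h1 := pvStepOK hA (hPre e (by simp)).1 (hPre e (by simp)).2
    have h2 := ih (E0 ++ [e]) (pvStep p e) h1 (fun e' he' => hPre e' (by simp [he']))
    simpa using h2

theorem pvWfix {p : List Int} (hI : pvInv p) {x : Nat} (hx : x < p.length) :
    pvPf p (pvIter p (p.length - 1) (pvPf p x)) = pvIter p (p.length - 1) (pvPf p x) := by
  have h1 : pvIter p (p.length - 1) (pvPf p x) = pvIter p ((p.length - 1) + 1) x :=
    (pvIter_succ p _ x).symm
  have h2 : pvIter p ((p.length - 1) + 1) x = pvIter p (p.length - 1) x :=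
    pvFixStable (pvRoot_fix hI hx) (by omega)
  rw [h1, h2]
  exact pvRoot_fix hI hx

theorem pvFinA (P : List Int) (hIP : pvInv P) :
    ∀ (target : List Int) (p : List Int) (acc : List Int),
    pvInv p → p.length = P.length → (∀ z, z < P.length → pvRoot p z = pvRoot P z) →
    (∀ i ∈ target, PySem.Raise.InRange P.length (i - 1)) →
    (target.foldl (fun (acc : List Int × List Int) i =>
        let r := pvFindRoot acc.1.length acc.1 (PySem.List.pyGetD acc.1 (i - 1) 0)
        (r.1, acc.2 ++ [r.2])) (p, acc)).2
      = acc ++ target.map (fun i => ((pvRoot P (pvNorm P.length (i - 1)) : Nat) : Int)) := by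
  intro target
  induction target with
  | nil => intro p acc _ _ _ _; simp
  | cons i ti ih =>
    intro p acc hI hlen hroots hInR
    have hiR : PySem.Raise.InRange p.length (i - 1) := by
      rw [hlen]; exact hInR i (by simp)
    set xi := pvNorm p.length (i - 1) with hxi
    have hxil : xi < p.length := pvNorm_lt hiR
    have hq : PySem.List.pyGetD p (i - 1) 0 = ((pvPf p xi : Nat) : Int) := by
      rw [pvGet_norm p _ 0 hiR, pvGetD_cast hI.1 hxil]
    have hwlt : pvPf p xi < p.length := pvPf_lt hI.1 hxil
    obtain ⟨hl1, hI1, hrt1, hv1⟩ :=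
      pvFrNat (p.length - 1) p (pvPf p xi) p.length hI hwlt (pvWfix hI hxil) (by omega)
    simp only [List.foldl_cons]
    rw [hq]
    set res := pvFindRoot p.length p ((pvPf p xi : Nat) : Int) with hres
    have hv1' : res.2 = ((pvRoot P xi : Nat) : Int) := by
      rw [hv1, pvRoot_pf hI hxil, hroots xi (by omega)]
    have hnorm : pvNorm P.length (i - 1) = xi := by rw [hxi, hlen]
    rw [ih res.1 (acc ++ [res.2]) hI1 (by omega) (fun z hz => by
        rw [hrt1 z (by omega)]; exact hroots z hz)
      (fun j hj => hInR j (by simp [hj]))]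
    rw [hv1', List.map_cons, hnorm]
    simp

theorem pvMapGetD {α : Type} (f : α → α) (xs : List α) (d : α) {i : Nat} (hi : i < xs.length) :
    (xs.map f).getD i d = f (xs.getD i d) := by
  rw [List.getD_eq_getElem?_getD, List.getD_eq_getElem?_getD, List.getElem?_map,
    List.getElem?_eq_getElem hi]
  simp

-- B-side state description and step
def pvBOK (m : Nat) (E : List (Int × Int × Int)) (L : List Int) : Prop :=
  L.length = m ∧ ∀ x y, x < m → y < m → (L.getD x 0 = L.getD y 0 ↔ pvConn m E x y)

theorem pvBStepOK {m : Nat} {E : List (Int × Int × Int)} {L : List Int}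
    (hB : pvBOK m E L) {e : Int × Int × Int}
    (hs : PySem.Raise.InRange m e.1) (ht : PySem.Raise.InRange m e.2.1) :
    pvBOK m (E ++ [e])
      ((fun L (e : Int × Int × Int) =>
        let a := PySem.List.pyGetD L e.1 0
        let b := PySem.List.pyGetD L e.2.1 0
        if a ≠ b then L.map (fun x => if x = a then b else x) else L) L e) := by
  obtain ⟨hlen, hrel⟩ := hB
  subst hlen
  set s' := pvNorm L.length e.1 with hs'
  set t' := pvNorm L.length e.2.1 with ht'
  have hsl : s' < L.length := pvNorm_lt hs
  have htl : t' < L.length := pvNorm_lt ht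
  have ha : PySem.List.pyGetD L e.1 0 = L.getD s' 0 := by rw [pvGet_norm L _ 0 hs, ← hs']
  have hb : PySem.List.pyGetD L e.2.1 0 = L.getD t' 0 := by rw [pvGet_norm L _ 0 ht, ← ht']
  by_cases hab : L.getD s' 0 = L.getD t' 0
  · -- labels already equal: list unchanged
    have hcond : ¬ (PySem.List.pyGetD L e.1 0 ≠ PySem.List.pyGetD L e.2.1 0) := by
      rw [ha, hb]; exact not_not_intro hab
    simp only [if_neg hcond]
    refine ⟨rfl, fun x y hx hy => ?_⟩
    rw [hrel x y hx hy, pvConn_snoc]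
    constructor
    · exact fun h => Or.inl h
    · intro h
      have hst : pvConn L.length E s' t' := (hrel s' t' hsl htl).mp hab
      rcases h with h1 | h2 | h3
      · exact h1
      · exact (h2.1.trans hst).trans h2.2
      · exact (h3.1.trans hst.symm).trans h3.2
  · have hcond : PySem.List.pyGetD L e.1 0 ≠ PySem.List.pyGetD L e.2.1 0 := by
      rw [ha, hb]; exact hab
    simp only [if_pos hcond]
    rw [ha, hb]
    refine ⟨by simp, fun x y hx hy => ?_⟩
    have hlx : x < L.length := hx
    have hly : y < L.length := hy
    rw [pvMapGetD _ L 0 hlx, pvMapGetD _ L 0 hly]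
    have hxs : L.getD x 0 = L.getD s' 0 ↔ pvConn L.length E x s' := hrel x s' hlx hsl
    have hys : L.getD y 0 = L.getD s' 0 ↔ pvConn L.length E y s' := hrel y s' hly hsl
    have hxt : L.getD x 0 = L.getD t' 0 ↔ pvConn L.length E x t' := hrel x t' hlx htl
    have hyt : L.getD y 0 = L.getD t' 0 ↔ pvConn L.length E y t' := hrel y t' hly htl
    have hxy : L.getD x 0 = L.getD y 0 ↔ pvConn L.length E x y := hrel x y hlx hly
    rw [pvConn_snoc, ← hs', ← ht']
    by_cases hx1 : L.getD x 0 = L.getD s' 0 <;> by_cases hy1 : L.getD y 0 = L.getD s' 0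
    · rw [if_pos hx1, if_pos hy1]
      simp only [true_iff]
      exact Or.inl ((hxs.mp hx1).trans (hys.mp hy1).symm)
    · rw [if_pos hx1, if_neg hy1]
      constructor
      · intro hveq
        exact Or.inr (Or.inl ⟨hxs.mp hx1, (hyt.mp hveq.symm).symm⟩)
      · intro h
        rcases h with h1 | h2 | h3
        · exact absurd ((hxy.mpr h1).symm.trans hx1) hy1
        · exact (hyt.mpr h2.2.symm).symm
        · exact absurd (hx1.symm.trans (hxt.mpr h3.1)) hab
    · rw [if_neg hx1, if_pos hy1]
      constructor
      · intro hveq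
        exact Or.inr (Or.inr ⟨hxt.mp hveq, (hys.mp hy1).symm⟩)
      · intro h
        rcases h with h1 | h2 | h3
        · exact absurd ((hxy.mpr h1).trans hy1) hx1
        · exact absurd (hxs.mpr h2.1) hx1
        · exact hxt.mpr h3.1
    · rw [if_neg hx1, if_neg hy1, hxy]
      constructor
      · exact fun h => Or.inl h
      · intro h
        rcases h with h1 | h2 | h3
        · exact h1
        · exact absurd (hxs.mpr h2.1) hx1
        · exact absurd (hys.mpr h3.2.symm) hy1

theorem pvFoldB (m : Nat) : ∀ (costs E0 : List (Int × Int × Int)) (L : List Int),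
    pvBOK m E0 L →
    (∀ e ∈ costs, PySem.Raise.InRange m e.1 ∧ PySem.Raise.InRange m e.2.1) →
    pvBOK m (E0 ++ costs)
      (costs.foldl (fun L (e : Int × Int × Int) =>
        let a := PySem.List.pyGetD L e.1 0
        let b := PySem.List.pyGetD L e.2.1 0
        if a ≠ b then L.map (fun x => if x = a then b else x) else L) L) := by
  intro costs
  induction costs with
  | nil => intro E0 L hB _; simpa using hB
  | cons e cs ih =>
    intro E0 L hB hPre
    have h1 := pvBStepOK hB (hPre e (by simp)).1 (hPre e (by simp)).2
    have h2 := ih (E0 ++ [e]) _ h1 (fun e' he' => hPre e' (by simp [he']))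
    simpa using h2

theorem pvBInit (n : Int) : pvBOK n.toNat [] (PySem.List.pyRange 0 n 1) := by
  have h := pvInitOK n
  obtain ⟨hI, hlen, hrel⟩ := h
  refine ⟨hlen, fun x y hx hy => ?_⟩
  have hval : ∀ z, z < n.toNat → (PySem.List.pyRange 0 n 1).getD z 0 = (z : Int) := by
    intro z hz
    rw [List.getD_eq_getElem?_getD, List.getElem?_eq_getElem (by omega : z < (PySem.List.pyRange 0 n 1).length)]
    simp only [Option.getD_some]
    rw [PySem.List.getElem_pyRange_one]
    simp
  rw [hval x hx, hval y hy]
  constructor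
  · intro h
    have : x = y := by exact_mod_cast h
    rw [this]; exact pvConn.refl y
  · intro h
    have : x = y := pvConn_nil h
    rw [this]

theorem pvHeadIMem {l : List Int} (h : l ≠ []) : l.headI ∈ l := by
  cases l with
  | nil => exact absurd rfl h
  | cons a t => exact List.mem_cons_self

theorem pvNodupSingleton {l : List Int} {c : Int} (hnd : l.Nodup)
    (hmem : ∀ a, a ∈ l ↔ a = c) : l = [c] := by
  cases l with
  | nil => exact absurd ((hmem c).mpr rfl) (List.not_mem_nil)
  | cons b t =>
    have hb : b = c := (hmem b).mp List.mem_cons_self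
    subst hb
    have ht : t = [] := by
      apply List.eq_nil_iff_forall_not_mem.mpr
      intro a ha
      have ha' : a = b := (hmem a).mp (List.mem_cons_of_mem _ ha)
      subst ha'
      exact (List.nodup_cons.mp hnd).1 ha
    rw [ht]

theorem pvSetLenOne (xs : List Int) :
    (PySem.Set.ofList xs).length = 1 ↔ xs ≠ [] ∧ ∀ a ∈ xs, a = xs.headI := by
  constructor
  · intro h
    obtain ⟨c, hc⟩ := List.length_eq_one_iff.mp h
    have hne : xs ≠ [] := by
      intro hnil
      subst hnil
      rw [show PySem.Set.ofList ([] : List Int) = [] from rfl] at hc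
      cases hc
    refine ⟨hne, fun a ha => ?_⟩
    have h1 : a ∈ PySem.Set.ofList xs := (PySem.Set.mem_ofList xs a).mpr ha
    rw [hc] at h1
    have ha' : a = c := by simpa using h1
    have h2 : xs.headI ∈ PySem.Set.ofList xs := (PySem.Set.mem_ofList xs xs.headI).mpr (pvHeadIMem hne)
    rw [hc] at h2
    have hh : xs.headI = c := by simpa using h2
    rw [ha', hh]
  · rintro ⟨hne, hall⟩
    have hc : PySem.Set.ofList xs = [xs.headI] := by
      apply pvNodupSingleton (PySem.Set.nodup_ofList xs)
      intro a
      rw [PySem.Set.mem_ofList xs a]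
      constructor
      · exact fun ha => hall a ha
      · exact fun ha => ha ▸ pvHeadIMem hne
    rw [hc]
    rfl

theorem pvMapLenOne (f : Int → Int) (t : List Int) :
    (PySem.Set.ofList (t.map f)).length = 1 ↔ t ≠ [] ∧ ∀ i ∈ t, f i = f t.headI := by
  rw [pvSetLenOne]
  cases t with
  | nil => simp
  | cons j tj =>
    have hhead : ((j :: tj).map f).headI = f ((j :: tj).headI) := rfl
    constructor
    · rintro ⟨_, hall⟩
      refine ⟨by simp, fun i hi => ?_⟩
      have h := hall (f i) (List.mem_map_of_mem hi)
      rw [hhead] at h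
      exact h
    · rintro ⟨_, hall⟩
      refine ⟨by simp, fun a ha => ?_⟩
      obtain ⟨i, hi, rfl⟩ := List.mem_map.mp ha
      rw [hhead]
      exact hall i hi

theorem pvBoolEq {a b : Nat} (h : a = 1 ↔ b = 1) : (a == 1) = (b == 1) := by
  by_cases ha : a = 1
  · simp [ha, h.mp ha]
  · have hb : ¬ b = 1 := fun hb => ha (h.mpr hb)
    simp [ha, hb]

theorem solution_spec_main (n : Int) (costs : List (Int × Int × Int)) (target : List Int)
    (hPreC : ∀ e ∈ costs, PySem.Raise.InRange n.toNat e.1 ∧ PySem.Raise.InRange n.toNat e.2.1)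
    (hPreT : ∀ i ∈ target, PySem.Raise.InRange n.toNat (i - 1)) :
    solution n costs target = solution_alt n costs target := by
  have hA := pvFoldA n.toNat costs [] (PySem.List.pyRange 0 n 1) (pvInitOK n) hPreC
  rw [List.nil_append] at hA
  obtain ⟨hIP, hlenP, hrelP⟩ := hA
  have hB := pvFoldB n.toNat costs [] (PySem.List.pyRange 0 n 1) (pvBInit n) hPreC
  rw [List.nil_append] at hB
  obtain ⟨hlenL, hrelL⟩ := hB
  set P := costs.foldl pvStep (PySem.List.pyRange 0 n 1) with hP
  set L := costs.foldl (fun L (e : Int × Int × Int) =>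
        let a := PySem.List.pyGetD L e.1 0
        let b := PySem.List.pyGetD L e.2.1 0
        if a ≠ b then L.map (fun x => if x = a then b else x) else L)
      (PySem.List.pyRange 0 n 1) with hL
  have hTargetR : ∀ i ∈ target, PySem.Raise.InRange P.length (i - 1) := fun i hi => by
    rw [hlenP]; exact hPreT i hi
  have hFin := pvFinA P hIP target P [] hIP rfl (fun z _ => rfl) hTargetR
  have hsol : solution n costs target =
      ((PySem.Set.ofList ((target.foldl (fun (acc : List Int × List Int) i =>
          let r := pvFindRoot acc.1.length acc.1 (PySem.List.pyGetD acc.1 (i - 1) 0)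
          (r.1, acc.2 ++ [r.2])) (P, ([] : List Int))).2)).length == 1) := rfl
  have halt : solution_alt n costs target =
      ((PySem.Set.ofList (target.map (fun i => PySem.List.pyGetD L (i - 1) 0))).length == 1) := rfl
  rw [hsol, halt, hFin, List.nil_append]
  have hmapB : target.map (fun i => PySem.List.pyGetD L (i - 1) 0)
      = target.map (fun i => L.getD (pvNorm n.toNat (i - 1)) 0) := by
    apply List.map_congr_left
    intro i hi
    have hiR : PySem.Raise.InRange L.length (i - 1) := by rw [hlenL]; exact hPreT i hi
    rw [pvGet_norm L _ 0 hiR, hlenL]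
  have hmapA : target.map (fun i => ((pvRoot P (pvNorm P.length (i - 1)) : Nat) : Int))
      = target.map (fun i => ((pvRoot P (pvNorm n.toNat (i - 1)) : Nat) : Int)) := by
    rw [hlenP]
  rw [hmapB, hmapA]
  apply pvBoolEq
  rw [pvMapLenOne, pvMapLenOne]
  by_cases hne : target = []
  · simp [hne]
  · have hhd : target.headI ∈ target := pvHeadIMem hne
    have key : ∀ i ∈ target,
        ((((pvRoot P (pvNorm n.toNat (i-1)) : Nat) : Int)
            = ((pvRoot P (pvNorm n.toNat (target.headI - 1)) : Nat) : Int))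
          ↔ (L.getD (pvNorm n.toNat (i-1)) 0 = L.getD (pvNorm n.toNat (target.headI - 1)) 0)) := by
      intro i hi
      have hxi : pvNorm n.toNat (i-1) < n.toNat := pvNorm_lt (hPreT i hi)
      have hxh : pvNorm n.toNat (target.headI - 1) < n.toNat := pvNorm_lt (hPreT _ hhd)
      constructor
      · intro h
        have h' : pvRoot P (pvNorm n.toNat (i-1)) = pvRoot P (pvNorm n.toNat (target.headI - 1)) := by
          exact_mod_cast h
        exact (hrelL _ _ hxi hxh).mpr ((hrelP _ _ hxi hxh).mp h')
      · intro h
        exact_mod_cast (hrelP _ _ hxi hxh).mpr ((hrelL _ _ hxi hxh).mp h)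
    constructor
    · rintro ⟨h1, hall⟩
      exact ⟨h1, fun i hi => (key i hi).mp (hall i hi)⟩
    · rintro ⟨h1, hall⟩
      exact ⟨h1, fun i hi => (key i hi).mpr (hall i hi)⟩

-- ===== VERDICT (by name: the statement is the Claim_ definition above) =====
theorem solution_spec : Claim_equal_solution := by
  intro n costs target hDom hPre
  exact solution_spec_main n costs target hPre.1 hPre.2
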